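-- pv_equiv track=rewrite | github.com/gabriel-a-b-gomes/MC621 | 2023-08-25/E.py | solve
-- ===== SOURCE A (Python) =====
-- def solve(inp):
--   int = 0
--   for i in inp:
--     int += 1 if i == '?' else 0
--
--   if inp[0] == '0':
--     return 0
--
--   if int == 0:
--     return 1
--
--   ans = 0
--   if inp[0] == '?':
--     ans = 9
--   else:
--     ans = 10
--
--   int -= 1
--
--   ans *= 10 ** int
--
--   return ans
-- ===== SOURCE B (Python) =====
-- def solve(inp):
--     if inp[0] == '0':
--         return 0
--     ans = 1
--     for i, c in enumerate(inp):
--         if c == '?':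
--             ans *= 9 if i == 0 else 10
--     return ans
-- ===== Notes on version B (the rewrite author's own statement) =====
-- stated objective: simpler
-- what changed: Replaces the count-then-closed-form (9*10**(k-1) / 10**k) computation with a single pass that maintains a running product, multiplying by 9 for a leading '?' and by 10 for any later '?'.
import Mathlib
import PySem

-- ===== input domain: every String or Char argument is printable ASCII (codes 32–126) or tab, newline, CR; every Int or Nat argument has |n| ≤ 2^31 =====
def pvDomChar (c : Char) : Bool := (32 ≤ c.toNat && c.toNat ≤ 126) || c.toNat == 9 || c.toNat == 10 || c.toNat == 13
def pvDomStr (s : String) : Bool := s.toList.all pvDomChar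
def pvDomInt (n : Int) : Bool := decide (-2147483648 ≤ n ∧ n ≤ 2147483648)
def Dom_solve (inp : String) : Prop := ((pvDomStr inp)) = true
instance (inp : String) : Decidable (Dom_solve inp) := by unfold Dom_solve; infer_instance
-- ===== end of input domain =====

-- B replaces A's count-then-closed-form (9*10**(k-1) / 10**k) with a single pass keeping a
-- running product (×9 for a leading '?', ×10 for any later '?'); objective: simpler.

-- ===== PORT A =====
def solve (inp : String) : Int :=
  -- 'int = 0; for i in inp: int += 1 if i == '?' else 0'
  let cnt : Int := inp.toList.foldl (fun acc i => acc + (if i = '?' then 1 else 0)) 0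
  match PySem.List.pyGet? inp.toList 0 with  -- inp[0]; none = IndexError (excluded by Pre_)
  | none => 0
  | some c0 =>
    if c0 = '0' then 0
    else if cnt = 0 then 1
    else
      let ans : Int := if c0 = '?' then 9 else 10
      ans * 10 ^ (cnt - 1).toNat  -- 'ans *= 10 ** int' (int ≥ 0 here)

-- ===== PORT B =====
def solve_alt (inp : String) : Int :=
  match PySem.List.pyGet? inp.toList 0 with  -- inp[0]; none = IndexError (excluded by Pre_)
  | none => 0
  | some c0 =>
    if c0 = '0' then 0
    else
      (PySem.List.enumerate inp.toList).foldl
        (fun ans ic => if ic.2 = '?' then ans * (if ic.1 = 0 then 9 else 10) else ans) (1 : Int)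

-- ===== PRECONDITION & SPEC =====
-- Pre_ excludes only the empty string, on which A raises IndexError (inp[0]).
def Pre_solve (inp : String) : Prop := inp ≠ ""
instance (inp : String) : Decidable (Pre_solve inp) := by unfold Pre_solve; infer_instance
def pvWitness_solve : String := "1??"

def Spec_solve (inp : String) (out : Int) : Prop := out = solve_alt inp
instance (inp : String) (out : Int) : Decidable (Spec_solve inp out) := by unfold Spec_solve; infer_instance

-- ===== CLAIM (what is proved, stated in full; the proofs are below) =====
def Claim_equal_solve : Prop := ∀ (inp : String), Dom_solve inp → Pre_solve inp → Spec_solve inp (solve inp)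

-- ===== LEMMAS AND PROOFS =====

-- Counting fold = List.count.
theorem count_fold (cs : List Char) (a : Int) :
    cs.foldl (fun acc i => acc + (if i = '?' then 1 else 0)) a = a + (cs.count '?' : Nat) := by
  induction cs generalizing a with
  | nil => simp
  | cons x xs ih =>
    simp only [List.foldl_cons, ih, List.count_cons]
    by_cases h : x = '?'
    · simp [h]; ring
    · simp [h]

-- The product fold over indices ≥ 1 multiplies by 10 once per '?'.
theorem prod_fold (rest : List Char) (s : Int) (hs : 1 ≤ s) (acc : Int) :
    (PySem.List.enumerate rest s).foldl
      (fun ans ic => if ic.2 = '?' then ans * (if ic.1 = 0 then 9 else 10) else ans) acc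
    = acc * 10 ^ (rest.count '?') := by
  induction rest generalizing s acc with
  | nil => simp [PySem.List.enumerate_nil]
  | cons x xs ih =>
    have hs0 : s ≠ 0 := by omega
    rw [PySem.List.enumerate_cons]
    simp only [List.foldl_cons, List.count_cons]
    by_cases h : x = '?'
    · rw [if_pos h, if_neg hs0, ih _ (by omega)]
      simp [h, pow_succ]; ring
    · rw [if_neg h, ih _ (by omega)]
      simp [h]

theorem solve_eq_alt (inp : String) (h : inp ≠ "") : solve inp = solve_alt inp := by
  unfold solve solve_alt
  obtain ⟨c, rest, hcs⟩ : ∃ c rest, inp.toList = c :: rest := by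
    cases hx : inp.toList with
    | nil => exact absurd (String.toList_eq_nil_iff.mp hx) h
    | cons c rest => exact ⟨c, rest, rfl⟩
  rw [hcs, PySem.List.pyGet?_zero_cons, PySem.List.enumerate_cons]
  simp only [List.foldl_cons]
  rw [count_fold, prod_fold _ _ (by norm_num)]
  by_cases h0 : c = '0'
  · simp [h0]
  rw [if_neg h0, if_neg h0]
  by_cases hq : c = '?'
  · have hk : ((0:Int) + (if c = '?' then (1:Int) else 0) + (rest.count '?' : Nat)) ≠ 0 := by
      rw [if_pos hq]; positivity
    have ht : (((0:Int) + (if c = '?' then (1:Int) else 0) + (rest.count '?' : Nat)) - 1).toNat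
        = rest.count '?' := by
      rw [if_pos hq]; omega
    rw [if_neg hk, ht, if_pos hq, if_pos hq]
    norm_num
  · simp only [hq, if_false]
    by_cases hz : rest.count '?' = 0
    · simp [hz]
    · have hne : ((0:Int) + 0 + (rest.count '?' : Nat)) ≠ 0 := by
        simp; omega
      rw [if_neg hne]
      have ht : (((0:Int) + 0 + (rest.count '?' : Nat)) - 1).toNat = rest.count '?' - 1 := by omega
      rw [ht]
      have hp : 10 * (10 : Int) ^ (rest.count '?' - 1) = 10 ^ (rest.count '?') := by
        rw [← pow_succ']
        congr 1
        omega
      rw [hp]; ring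

-- ===== VERDICT (by name: the statement is the Claim_ definition above) =====
theorem solve_spec : Claim_equal_solve := by
  intro inp _ hpre
  unfold Spec_solve
  exact solve_eq_alt inp hpre
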